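-- pv_equiv track=rewrite | github.com/TheAuditorTool/Auditor | theauditor/rules/common/utils.py | is_sequential
-- ===== SOURCE A (Python) =====
-- def is_sequential(text: str) -> bool:
--     """Check if a string follows a sequential pattern (incrementing or decrementing).
--
--     Examples:
--     - "abcdef" -> True (incrementing)
--     - "987654" -> True (decrementing)
--     - "zyxwvu" -> True (decrementing)
--     - "abc123" -> False (mixed)
--     """
--     if len(text) < 3:
--         return False
--
--     # Get ASCII differences between adjacent characters
--     differences = []
--     for i in range(1, len(text)):
--         diff = ord(text[i]) - ord(text[i-1])
--         differences.append(diff)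
--
--     # Check if all differences are the same (consistent increment/decrement)
--     if len(set(differences)) == 1:
--         # Common sequential patterns have difference of 1 or -1
--         if differences[0] in [1, -1]:
--             return True
--
--     return False
-- ===== SOURCE B (Python) =====
-- def is_sequential(text: str) -> bool:
--     if len(text) < 3:
--         return False
--     base = ord(text[0])
--     asc = all(ord(text[i]) == base + i for i in range(len(text)))
--     desc = all(ord(text[i]) == base - i for i in range(len(text)))
--     return asc or desc
-- ===== Notes on version B (the rewrite author's own statement) =====
-- stated objective: simpler
-- what changed: Instead of materialising the list of adjacent ord-differences, deduplicating it into a set and inspecting its size and first element, B tests the string directly as an arithmetic progression by absolute position: ord(text[i]) must equal ord(text[0]) +/- i for all i.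
import Mathlib
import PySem

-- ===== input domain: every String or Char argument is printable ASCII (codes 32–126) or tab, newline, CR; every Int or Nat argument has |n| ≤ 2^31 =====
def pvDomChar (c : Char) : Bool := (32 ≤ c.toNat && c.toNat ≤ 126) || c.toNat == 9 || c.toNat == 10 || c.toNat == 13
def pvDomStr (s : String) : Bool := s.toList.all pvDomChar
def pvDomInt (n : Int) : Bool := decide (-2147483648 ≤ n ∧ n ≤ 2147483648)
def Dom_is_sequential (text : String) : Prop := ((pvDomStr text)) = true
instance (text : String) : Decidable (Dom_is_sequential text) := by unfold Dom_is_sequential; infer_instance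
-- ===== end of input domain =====

-- B replaces A's adjacent-difference list + set-deduplication with a direct
-- absolute-position arithmetic-progression test (objective: simpler); same return value on every input.

-- ===== PORT A =====
def is_sequential (text : String) : Bool :=
  let cs := text.toList
  if cs.length < 3 then false
  else
    -- for i in range(1, len(text)): differences.append(ord(text[i]) - ord(text[i-1]))
    -- (indices i and i-1 are always in range here, so pyGetD's default is never used)
    let differences : List Int :=
      (PySem.List.pyRange 1 (cs.length : Int) 1).foldl
        (fun acc i =>
          acc ++ [((PySem.List.pyGetD cs i ' ').toNat : Int)
                  - ((PySem.List.pyGetD cs (i - 1) ' ').toNat : Int)]) []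
    if PySem.Set.len (PySem.Set.ofList differences) == 1 then
      if [(1 : Int), -1].contains (PySem.List.pyGetD differences 0 0) then true
      else false
    else false

-- ===== PORT B =====
def is_sequential_alt (text : String) : Bool :=
  let cs := text.toList
  if cs.length < 3 then false
  else
    let base : Int := ((cs.headD ' ').toNat : Int)
    let asc := (List.range cs.length).all
      (fun i => (((cs.getD i ' ').toNat : Int) == base + (i : Int)))
    let desc := (List.range cs.length).all
      (fun i => (((cs.getD i ' ').toNat : Int) == base - (i : Int)))
    asc || desc

-- ===== PRECONDITION & SPEC =====
def Spec_is_sequential (text : String) (out : Bool) : Prop := out = is_sequential_alt text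
instance (text : String) (out : Bool) : Decidable (Spec_is_sequential text out) := by unfold Spec_is_sequential; infer_instance

-- ===== CLAIM (what is proved, stated in full; the proofs are below) =====
def Claim_equal_is_sequential : Prop := ∀ (text : String), Dom_is_sequential text → Spec_is_sequential text (is_sequential text)

-- ===== LEMMAS AND PROOFS =====

-- the ord value at position i (default never used under the bounds we use it with)
def pvOrd (cs : List Char) (i : Nat) : Int := ((cs.getD i ' ').toNat : Int)

lemma pv_len_le_foldl_add (l : List Int) (s : PySem.Set Int) :
    s.length ≤ (l.foldl PySem.Set.add s).length := by
  induction l generalizing s with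
  | nil => simp
  | cons x l ih =>
    refine le_trans ?_ (ih (s.add x))
    unfold PySem.Set.add
    split
    · exact le_refl _
    · simp

lemma pv_foldl_add_len_eq_iff (l : List Int) (s : PySem.Set Int) :
    (l.foldl PySem.Set.add s).length = s.length ↔ ∀ x ∈ l, x ∈ s := by
  induction l generalizing s with
  | nil => simp
  | cons x l ih =>
    by_cases hx : x ∈ s
    · have hadd : s.add x = s := by
        unfold PySem.Set.add
        rw [if_pos (by simpa [PySem.Set.contains] using hx)]
      rw [List.foldl_cons, hadd, ih]
      simp [hx]
    · have hadd : s.add x = s ++ [x] := by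
        unfold PySem.Set.add
        rw [if_neg (by simpa [PySem.Set.contains] using hx)]
      rw [List.foldl_cons, hadd]
      constructor
      · intro h
        exfalso
        have hle := pv_len_le_foldl_add l (s ++ [x])
        rw [h] at hle
        simp [List.length_append] at hle
      · intro h
        exact absurd (h x (by simp)) hx

lemma pv_setlen_one_iff (L : List Int) (hL : L ≠ []) :
    ((PySem.Set.ofList L).length = 1 ↔ ∀ x ∈ L, x = L.getD 0 0) := by
  obtain ⟨a, l, rfl⟩ := List.exists_cons_of_ne_nil hL
  have h0 : PySem.Set.ofList (a :: l) = l.foldl PySem.Set.add [a] := by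
    simp [PySem.Set.ofList, PySem.Set.empty, PySem.Set.add, PySem.Set.contains]
  rw [h0]
  have hiff := pv_foldl_add_len_eq_iff l [a]
  simp only [List.length_singleton] at hiff
  rw [hiff]
  simp only [List.mem_singleton, List.getD_cons_zero]
  constructor
  · intro h x hx
    rcases List.mem_cons.mp hx with rfl | hx'
    · rfl
    · exact h x hx'
  · intro h x hx
    exact h x (List.mem_cons_of_mem _ hx)

-- all adjacent differences equal s ↔ arithmetic progression by absolute position
lemma pv_prog_iff (cs : List Char) (s : Int) :
    (∀ k, k < cs.length - 1 → pvOrd cs (k + 1) - pvOrd cs k = s) ↔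
    (∀ i, i < cs.length → pvOrd cs i = pvOrd cs 0 + s * i) := by
  constructor
  · intro h i hi
    induction i with
    | zero => simp
    | succ i ih =>
      have h1 : pvOrd cs (i + 1) - pvOrd cs i = s := h i (by omega)
      have h2 : pvOrd cs i = pvOrd cs 0 + s * i := ih (by omega)
      push_cast
      rw [show pvOrd cs (i + 1) = pvOrd cs i + s by omega, h2]; ring
  · intro h k hk
    have h1 := h k (by omega)
    have h2 := h (k + 1) (by omega)
    rw [h1, h2]; push_cast; ring

-- A's differences list written as a map over List.range
lemma pv_differences_eq (cs : List Char) :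
    (PySem.List.pyRange 1 (cs.length : Int) 1).foldl
        (fun acc i =>
          acc ++ [((PySem.List.pyGetD cs i ' ').toNat : Int)
                  - ((PySem.List.pyGetD cs (i - 1) ' ').toNat : Int)]) []
      = (List.range (cs.length - 1)).map (fun k => pvOrd cs (k + 1) - pvOrd cs k) := by
  rw [PySem.List.foldl_append_singleton_eq_map, PySem.List.pyRange_one]
  rw [List.map_map]
  have hn : ((cs.length : Int) - 1).toNat = cs.length - 1 := by omega
  rw [hn]
  apply List.map_congr_left
  intro k _
  have h1 : (1 : Int) + (k : Int) = ((k + 1 : Nat) : Int) := by push_cast; ring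
  have h2 : ((k + 1 : Nat) : Int) - 1 = ((k : Nat) : Int) := by push_cast; ring
  simp only [Function.comp, h1, h2, PySem.List.pyGetD_natCast, pvOrd]

lemma pv_main (text : String) : is_sequential text = is_sequential_alt text := by
  unfold is_sequential is_sequential_alt
  set cs := text.toList with hcs
  by_cases hlen : cs.length < 3
  · simp [hlen]
  · simp only [hlen, if_false]
    rw [pv_differences_eq]
    set L := (List.range (cs.length - 1)).map (fun k => pvOrd cs (k + 1) - pvOrd cs k) with hL
    have hn3 : 3 ≤ cs.length := by omega
    have hLne : L ≠ [] := by
      simp [hL, List.map_eq_nil_iff, List.range_eq_nil]; omega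
    -- characterize "all elements of L equal s"
    have hall : ∀ s : Int, (∀ x ∈ L, x = s) ↔
        (∀ i, i < cs.length → pvOrd cs i = pvOrd cs 0 + s * i) := by
      intro s
      rw [← pv_prog_iff]
      simp [hL]
    -- the head of L is the difference at position 0
    have hhead : L.getD 0 0 = pvOrd cs 1 - pvOrd cs 0 := by
      have h0 : (0 : Nat) < cs.length - 1 := by omega
      simp [hL, List.getD_eq_getElem?_getD, List.getElem?_range h0]
    have hmem : pvOrd cs 1 - pvOrd cs 0 ∈ L := by
      rw [hL]
      exact List.mem_map.mpr ⟨0, List.mem_range.mpr (by omega), rfl⟩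
    have hbase : ((cs.headD ' ').toNat : Int) = pvOrd cs 0 := by
      cases cs <;> simp [pvOrd]
    -- B's two all-tests, characterized
    have hside : ∀ s : Int,
        ((List.range cs.length).all
          (fun i => (((cs.getD i ' ').toNat : Int) == ((cs.headD ' ').toNat : Int) + s * (i : Int))) = true)
        ↔ (∀ i, i < cs.length → pvOrd cs i = pvOrd cs 0 + s * i) := by
      intro s
      rw [List.all_eq_true]
      constructor
      · intro h i hi
        have h2 := h i (List.mem_range.mpr hi)
        rw [beq_iff_eq, hbase] at h2
        exact h2
      · intro h i hi
        rw [beq_iff_eq, hbase]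
        exact h i (List.mem_range.mp hi)
    have hasc : ((List.range cs.length).all
          (fun i => (((cs.getD i ' ').toNat : Int) == ((cs.headD ' ').toNat : Int) + (i : Int))) = true)
        ↔ (∀ i, i < cs.length → pvOrd cs i = pvOrd cs 0 + 1 * i) := by
      rw [← hside 1]
      constructor
      · intro h
        apply List.all_eq_true.mpr
        intro i hi
        have h2 := List.all_eq_true.mp h i hi
        rw [beq_iff_eq] at h2 ⊢
        omega
      · intro h
        apply List.all_eq_true.mpr
        intro i hi
        have h2 := List.all_eq_true.mp h i hi
        rw [beq_iff_eq] at h2 ⊢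
        omega
    have hdesc : ((List.range cs.length).all
          (fun i => (((cs.getD i ' ').toNat : Int) == ((cs.headD ' ').toNat : Int) - (i : Int))) = true)
        ↔ (∀ i, i < cs.length → pvOrd cs i = pvOrd cs 0 + (-1) * i) := by
      rw [← hside (-1)]
      constructor
      · intro h
        apply List.all_eq_true.mpr
        intro i hi
        have h2 := List.all_eq_true.mp h i hi
        rw [beq_iff_eq] at h2 ⊢
        omega
      · intro h
        apply List.all_eq_true.mpr
        intro i hi
        have h2 := List.all_eq_true.mp h i hi
        rw [beq_iff_eq] at h2 ⊢
        omega
    rcases Bool.eq_false_or_eq_true (PySem.Set.len (PySem.Set.ofList L) == 1) with hset | hset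
    · -- the set of differences is a singleton
      rw [hset, if_pos rfl]
      have heq1 : (PySem.Set.ofList L).length = 1 := by
        simpa [PySem.Set.len] using (beq_iff_eq.mp hset)
      have hallhead : ∀ x ∈ L, x = L.getD 0 0 := (pv_setlen_one_iff L hLne).mp heq1
      by_cases hin : L.getD 0 0 = 1 ∨ L.getD 0 0 = -1
      · have hcont : [(1 : Int), -1].contains (PySem.List.pyGetD L 0 0) = true := by
          rw [PySem.List.pyGetD_zero]
          rcases hin with h | h <;> simp only [List.getD_eq_getElem?_getD] at h <;> simp [h]
        rw [hcont, if_pos rfl]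
        symm
        rw [Bool.or_eq_true]
        rcases hin with h | h
        · exact Or.inl (hasc.mpr ((hall 1).mp (fun x hx => by rw [hallhead x hx, h])))
        · exact Or.inr (hdesc.mpr ((hall (-1)).mp (fun x hx => by rw [hallhead x hx, h])))
      · have hcont : [(1 : Int), -1].contains (PySem.List.pyGetD L 0 0) = false := by
          rw [PySem.List.pyGetD_zero]
          push_neg at hin
          simp only [List.getD_eq_getElem?_getD] at hin
          simp [hin.1, hin.2]
        rw [hcont]
        simp only [Bool.false_eq_true, if_false]
        push_neg at hin
        symm
        rw [Bool.or_eq_false_iff]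
        refine ⟨Bool.eq_false_iff.mpr ?_, Bool.eq_false_iff.mpr ?_⟩
        · intro hP
          have h1 := hasc.mp hP 1 (by omega)
          exact hin.1 (by omega)
        · intro hP
          have h1 := hdesc.mp hP 1 (by omega)
          exact hin.2 (by omega)
    · -- the set of differences does not have exactly one element
      rw [hset]
      simp only [Bool.false_eq_true, if_false]
      have hne : ¬ ((PySem.Set.ofList L).length = 1) := by
        simpa [PySem.Set.len] using (beq_eq_false_iff_ne (a := PySem.Set.len (PySem.Set.ofList L)) (b := 1)).mp hset
      rw [pv_setlen_one_iff L hLne] at hne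
      symm
      rw [Bool.or_eq_false_iff]
      refine ⟨Bool.eq_false_iff.mpr ?_, Bool.eq_false_iff.mpr ?_⟩
      · intro hP
        have h1 : ∀ x ∈ L, x = 1 := (hall 1).mpr (hasc.mp hP)
        exact hne (fun x hx => by have := h1 _ hmem; rw [h1 x hx, hhead]; omega)
      · intro hP
        have h1 : ∀ x ∈ L, x = -1 := (hall (-1)).mpr (hdesc.mp hP)
        exact hne (fun x hx => by have := h1 _ hmem; rw [h1 x hx, hhead]; omega)

-- ===== VERDICT (by name: the statement is the Claim_ definition above) =====
theorem is_sequential_spec : Claim_equal_is_sequential := by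
  intro text _
  unfold Spec_is_sequential
  exact pv_main text
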